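-- pv_equiv track=rewrite | github.com/som-shahlab/opt-paradox | src/evals/lab_interpretation_evaluator.py | normalize_interpretation
-- ===== SOURCE A (Python) =====
-- from typing import Any, Dict
--
-- def normalize_interpretation(it: Any) -> str:
--     if not isinstance(it, str):
--         return "unknown"
--     it = it.strip().lower()
--     syn = {
--         "high": ["high", "elevated", "slightly elevated", "increased", "borderline high"],
--         "low":  ["low", "decreased", "reduced", "slightly low", "borderline low"],
--         "normal": ["normal", "within normal limits", "wnl"],
--         "unknown": ["unknown", "n/a", "not available", "none", ""]
--     }
--     for k, v in syn.items():
--         if it in v: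
--             return k
--     return it
-- ===== SOURCE B (Python) =====
-- from typing import Any
--
-- # Flat synonym table: (word, canonical category).
-- _WORDS = [
--     ("high", "high"), ("elevated", "high"), ("slightly elevated", "high"),
--     ("increased", "high"), ("borderline high", "high"),
--     ("low", "low"), ("decreased", "low"), ("reduced", "low"),
--     ("slightly low", "low"), ("borderline low", "low"),
--     ("normal", "normal"), ("within normal limits", "normal"), ("wnl", "normal"),
--     ("unknown", "unknown"), ("n/a", "unknown"), ("not available", "unknown"),
--     ("none", "unknown"), ("", "unknown"),
-- ]
--
-- # A character trie built once over all synonyms; matching walks the input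
-- # character by character instead of comparing whole strings against lists.
-- _TRIE = {}
-- for _w, _cat in _WORDS:
--     _node = _TRIE
--     for _ch in _w:
--         _node = _node.setdefault(_ch, {})
--     _node[None] = _cat  # terminal marker: category for this word
--
-- def normalize_interpretation(it: Any) -> str:
--     if not isinstance(it, str):
--         return "unknown"
--     it = it.strip().lower()
--     node = _TRIE
--     for ch in it:
--         if ch not in node:
--             return it
--         node = node[ch]
--     return node.get(None, it)
-- ===== Notes on version B (the rewrite author's own statement) =====
-- stated objective: alternative
-- what changed: A's loop over categories with an inner list-membership scan (whole-string comparisons) is replaced by a character trie built once over all 18 synonyms; B walks the normalized input one character at a time and reads the category off the terminal node, falling back to the input itself when the walk falls off the trie.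
import Mathlib
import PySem

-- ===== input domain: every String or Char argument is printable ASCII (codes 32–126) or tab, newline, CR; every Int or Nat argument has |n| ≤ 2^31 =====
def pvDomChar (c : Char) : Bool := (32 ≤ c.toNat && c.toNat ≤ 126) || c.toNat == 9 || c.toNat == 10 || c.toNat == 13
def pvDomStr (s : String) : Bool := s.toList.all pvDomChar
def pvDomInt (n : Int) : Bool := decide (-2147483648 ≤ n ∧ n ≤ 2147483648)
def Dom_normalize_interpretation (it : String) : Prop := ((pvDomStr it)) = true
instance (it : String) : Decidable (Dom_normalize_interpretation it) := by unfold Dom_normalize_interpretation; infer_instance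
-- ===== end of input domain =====

-- B replaces A's scan of the synonym table (loop over categories, list membership
-- per category) by a character trie built once over all synonyms, walked one input
-- character at a time (objective: alternative).


-- ===== PORT A =====
-- the syn dict of A, as an insertion-ordered association list
def pvSyn : List (String × List String) :=
  [("high", ["high", "elevated", "slightly elevated", "increased", "borderline high"]),
   ("low",  ["low", "decreased", "reduced", "slightly low", "borderline low"]),
   ("normal", ["normal", "within normal limits", "wnl"]),
   ("unknown", ["unknown", "n/a", "not available", "none", ""])]

-- the 'for k, v in syn.items(): if it in v: return k' loop with early return
def pvALoop (s : String) : List (String × List String) → String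
  | [] => s
  | (k, v) :: rest => if s ∈ v then k else pvALoop s rest

def normalize_interpretation (it : String) : String :=
  pvALoop (PySem.Str.lower (PySem.Str.strip it)) pvSyn

-- ===== PORT B =====
-- Source B's _TRIE (dict-of-dicts built once over all synonyms), flattened to an
-- indexed node list: node = (terminal category?, edges char → child index);
-- children always carry a larger index than their parent.
def pvNodes : List (Option String × List (Char × Nat)) := [
  (some "unknown", [('h', 1), ('e', 5), ('s', 13), ('i', 33), ('b', 42), ('l', 60), ('d', 63), ('r', 72), ('n', 79), ('w', 100), ('u', 122)]),
  (none, [('i', 2)]),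
  (none, [('g', 3)]),
  (none, [('h', 4)]),
  (some "high", []),
  (none, [('l', 6)]),
  (none, [('e', 7)]),
  (none, [('v', 8)]),
  (none, [('a', 9)]),
  (none, [('t', 10)]),
  (none, [('e', 11)]),
  (none, [('d', 12)]),
  (some "high", []),
  (none, [('l', 14)]),
  (none, [('i', 15)]),
  (none, [('g', 16)]),
  (none, [('h', 17)]),
  (none, [('t', 18)]),
  (none, [('l', 19)]),
  (none, [('y', 20)]),
  (none, [(' ', 21)]),
  (none, [('e', 22), ('l', 30)]),
  (none, [('l', 23)]),
  (none, [('e', 24)]),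
  (none, [('v', 25)]),
  (none, [('a', 26)]),
  (none, [('t', 27)]),
  (none, [('e', 28)]),
  (none, [('d', 29)]),
  (some "high", []),
  (none, [('o', 31)]),
  (none, [('w', 32)]),
  (some "low", []),
  (none, [('n', 34)]),
  (none, [('c', 35)]),
  (none, [('r', 36)]),
  (none, [('e', 37)]),
  (none, [('a', 38)]),
  (none, [('s', 39)]),
  (none, [('e', 40)]),
  (none, [('d', 41)]),
  (some "high", []),
  (none, [('o', 43)]),
  (none, [('r', 44)]),
  (none, [('d', 45)]),
  (none, [('e', 46)]),
  (none, [('r', 47)]),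
  (none, [('l', 48)]),
  (none, [('i', 49)]),
  (none, [('n', 50)]),
  (none, [('e', 51)]),
  (none, [(' ', 52)]),
  (none, [('h', 53), ('l', 57)]),
  (none, [('i', 54)]),
  (none, [('g', 55)]),
  (none, [('h', 56)]),
  (some "high", []),
  (none, [('o', 58)]),
  (none, [('w', 59)]),
  (some "low", []),
  (none, [('o', 61)]),
  (none, [('w', 62)]),
  (some "low", []),
  (none, [('e', 64)]),
  (none, [('c', 65)]),
  (none, [('r', 66)]),
  (none, [('e', 67)]),
  (none, [('a', 68)]),
  (none, [('s', 69)]),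
  (none, [('e', 70)]),
  (none, [('d', 71)]),
  (some "low", []),
  (none, [('e', 73)]),
  (none, [('d', 74)]),
  (none, [('u', 75)]),
  (none, [('c', 76)]),
  (none, [('e', 77)]),
  (none, [('d', 78)]),
  (some "low", []),
  (none, [('o', 80), ('/', 98)]),
  (none, [('r', 81), ('t', 85), ('n', 96)]),
  (none, [('m', 82)]),
  (none, [('a', 83)]),
  (none, [('l', 84)]),
  (some "normal", []),
  (none, [(' ', 86)]),
  (none, [('a', 87)]),
  (none, [('v', 88)]),
  (none, [('a', 89)]),
  (none, [('i', 90)]),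
  (none, [('l', 91)]),
  (none, [('a', 92)]),
  (none, [('b', 93)]),
  (none, [('l', 94)]),
  (none, [('e', 95)]),
  (some "unknown", []),
  (none, [('e', 97)]),
  (some "unknown", []),
  (none, [('a', 99)]),
  (some "unknown", []),
  (none, [('i', 101), ('n', 120)]),
  (none, [('t', 102)]),
  (none, [('h', 103)]),
  (none, [('i', 104)]),
  (none, [('n', 105)]),
  (none, [(' ', 106)]),
  (none, [('n', 107)]),
  (none, [('o', 108)]),
  (none, [('r', 109)]),
  (none, [('m', 110)]),
  (none, [('a', 111)]),
  (none, [('l', 112)]),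
  (none, [(' ', 113)]),
  (none, [('l', 114)]),
  (none, [('i', 115)]),
  (none, [('m', 116)]),
  (none, [('i', 117)]),
  (none, [('t', 118)]),
  (none, [('s', 119)]),
  (some "normal", []),
  (none, [('l', 121)]),
  (some "normal", []),
  (none, [('n', 123)]),
  (none, [('k', 124)]),
  (none, [('n', 125)]),
  (none, [('o', 126)]),
  (none, [('w', 127)]),
  (none, [('n', 128)]),
  (some "unknown", [])
]

def pvNode (i : Nat) : Option String × List (Char × Nat) := pvNodes.getD i (none, [])

-- Source B's 'for ch in it: if ch not in node: return it; node = node[ch]' walk;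
-- none = fell off the trie or ended at a non-terminal node (Source B returns it there)
def pvWalk (i : Nat) : List Char → Option String
  | [] => (pvNode i).1
  | c :: cs =>
    match (pvNode i).2.lookup c with
    | some j => pvWalk j cs
    | none => none

def normalize_interpretation_alt (it : String) : String :=
  let s := PySem.Str.lower (PySem.Str.strip it)
  match pvWalk 0 s.toList with
  | some k => k
  | none => s

-- ===== PRECONDITION & SPEC =====
def Spec_normalize_interpretation (it : String) (out : String) : Prop := out = normalize_interpretation_alt it
instance (it : String) (out : String) : Decidable (Spec_normalize_interpretation it out) := by unfold Spec_normalize_interpretation; infer_instance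

-- ===== CLAIM (what is proved, stated in full; the proofs are below) =====
def Claim_equal_normalize_interpretation : Prop := ∀ (it : String), Dom_normalize_interpretation it → Spec_normalize_interpretation it (normalize_interpretation it)

-- ===== LEMMAS AND PROOFS =====

-- the words stored below node i (with their categories), cut off at depth `fuel`
def pvNW : Nat → Nat → List (List Char × String)
  | 0, _ => []
  | f+1, i =>
    (match (pvNode i).1 with | some k => [([], k)] | none => []) ++
      (pvNode i).2.flatMap (fun e => (pvNW f e.2).map (fun p => (e.1 :: p.1, p.2)))

set_option maxRecDepth 10000 in
lemma pv_edges_fact : ∀ i ∈ List.range 129, ∀ e ∈ (pvNode i).2, i < e.2 ∧ e.2 < 129 := by decide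

set_option maxRecDepth 10000 in
lemma pv_edges_nodup : ∀ i ∈ List.range 129, ((pvNode i).2.map Prod.fst).Nodup := by decide

set_option maxRecDepth 10000 in
lemma pv_keys_eq : (pvNW 129 0).map Prod.fst =
  ["".toList,
   "high".toList,
   "elevated".toList,
   "slightly elevated".toList,
   "slightly low".toList,
   "increased".toList,
   "borderline high".toList,
   "borderline low".toList,
   "low".toList,
   "decreased".toList,
   "reduced".toList,
   "normal".toList,
   "not available".toList,
   "none".toList,
   "n/a".toList,
   "within normal limits".toList,
   "wnl".toList,
   "unknown".toList] := by decide

lemma pv_lk_none (k : List Char) (l : List (List Char × String)) (h : k ∉ l.map Prod.fst) :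
    l.lookup k = none := by
  induction l with
  | nil => rfl
  | cons p rest ih =>
    simp only [List.map_cons, List.mem_cons, not_or] at h
    simp [List.lookup, beq_eq_false_iff_ne.mpr h.1, ih h.2]

lemma pv_lk_append (k : List Char) (l l2 : List (List Char × String)) :
    List.lookup k (l ++ l2) = (List.lookup k l).or (List.lookup k l2) := by
  induction l with
  | nil => simp [List.lookup]
  | cons p rest ih => by_cases h : k == p.1 <;> simp [List.lookup, h, ih]

lemma pv_lk_mem (l : List (Char × Nat)) (c : Char) (j : Nat) (h : l.lookup c = some j) :
    (c, j) ∈ l := by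
  induction l with
  | nil => simp [List.lookup] at h
  | cons p rest ih =>
    by_cases hc : c == p.1
    · simp only [List.lookup, hc] at h
      cases p; simp_all
    · rw [List.lookup] at h
      simp only [Bool.not_eq_true] at hc
      rw [hc] at h
      exact List.mem_cons_of_mem _ (ih h)

lemma pv_lk_map_cons (c : Char) (cs : List Char) (L : List (List Char × String)) :
    List.lookup (c :: cs) (L.map (fun p => (c :: p.1, p.2))) = List.lookup cs L := by
  induction L with
  | nil => rfl
  | cons p rest ih =>
    by_cases h : cs == p.1 <;> simp [List.lookup, h, ih]

lemma pv_lk_map_ne (c c0 : Char) (hc : c ≠ c0) (cs : List Char) (L : List (List Char × String)) :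
    List.lookup (c :: cs) (L.map (fun p => (c0 :: p.1, p.2))) = none := by
  induction L with
  | nil => rfl
  | cons p rest ih => simp [List.lookup, beq_eq_false_iff_ne.mpr hc, ih]

lemma pv_lk_map_nil (c0 : Char) (L : List (List Char × String)) :
    List.lookup [] (L.map (fun p => (c0 :: p.1, p.2))) = none := by
  induction L with
  | nil => rfl
  | cons p rest ih => simp [List.lookup, ih]

lemma pv_lk_flat_nil (f : Nat) (edges : List (Char × Nat)) :
    List.lookup [] (edges.flatMap (fun e => (pvNW f e.2).map (fun p => (e.1 :: p.1, p.2)))) = none := by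
  induction edges with
  | nil => rfl
  | cons e rest ih =>
    rw [List.flatMap_cons, pv_lk_append, pv_lk_map_nil, ih]; rfl

lemma pv_lk_flat_ne (f : Nat) (c : Char) (cs : List Char) (edges : List (Char × Nat))
    (h : c ∉ edges.map Prod.fst) :
    List.lookup (c :: cs) (edges.flatMap (fun e => (pvNW f e.2).map (fun p => (e.1 :: p.1, p.2)))) = none := by
  induction edges with
  | nil => rfl
  | cons e rest ih =>
    simp only [List.map_cons, List.mem_cons, not_or] at h
    rw [List.flatMap_cons, pv_lk_append, pv_lk_map_ne _ _ h.1, ih h.2]; rfl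

lemma pv_lk_flat (f : Nat) (c : Char) (cs : List Char) (edges : List (Char × Nat))
    (hnd : (edges.map Prod.fst).Nodup) :
    List.lookup (c :: cs) (edges.flatMap (fun e => (pvNW f e.2).map (fun p => (e.1 :: p.1, p.2))))
      = match edges.lookup c with
        | some j => List.lookup cs (pvNW f j)
        | none => none := by
  induction edges with
  | nil => rfl
  | cons e rest ih =>
    simp only [List.map_cons, List.nodup_cons] at hnd
    rw [List.flatMap_cons, pv_lk_append]
    by_cases hc : c = e.1
    · subst hc
      rw [pv_lk_map_cons, pv_lk_flat_ne f _ _ _ hnd.1]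
      have : List.lookup e.1 (e :: rest) = some e.2 := by simp [List.lookup]
      rw [this, Option.or_none]
    · rw [pv_lk_map_ne _ _ hc, Option.none_or, ih hnd.2]
      have : List.lookup c (e :: rest) = List.lookup c rest := by
        simp [List.lookup, beq_eq_false_iff_ne.mpr hc]
      rw [this]

lemma pv_walk_nw : ∀ (cs : List Char) (i fuel : Nat), i < 129 → 129 - i ≤ fuel →
    pvWalk i cs = List.lookup cs (pvNW fuel i) := by
  intro cs
  induction cs with
  | nil =>
    intro i fuel hi hf
    obtain ⟨f, rfl⟩ : ∃ f, fuel = f + 1 := ⟨fuel - 1, by omega⟩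
    rw [pvNW]
    show (pvNode i).1 = _
    cases hterm : (pvNode i).1 with
    | some k => simp
    | none => simp [pv_lk_flat_nil]
  | cons c cs ih =>
    intro i fuel hi hf
    obtain ⟨f, rfl⟩ : ∃ f, fuel = f + 1 := ⟨fuel - 1, by omega⟩
    rw [pvNW, pv_lk_append]
    have hterm : List.lookup (c :: cs)
        (match (pvNode i).1 with | some k => [([], k)] | none => []) = none := by
      cases (pvNode i).1 <;> simp [List.lookup]
    rw [hterm, Option.none_or,
        pv_lk_flat _ _ _ _ (pv_edges_nodup i (List.mem_range.mpr hi))]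
    show (match (pvNode i).2.lookup c with
          | some j => pvWalk j cs
          | none => none) = _
    cases hl : (pvNode i).2.lookup c with
    | none => rfl
    | some j =>
      have hij := pv_edges_fact i (List.mem_range.mpr hi) _ (pv_lk_mem _ _ _ hl)
      exact ih j f (by omega) (by omega)

lemma pv_walk0 (cs : List Char) : pvWalk 0 cs = List.lookup cs (pvNW 129 0) :=
  pv_walk_nw cs 0 129 (by omega) (by omega)

set_option maxRecDepth 10000 in
lemma pv_core (s : String) :
    (match pvWalk 0 s.toList with | some k => k | none => s) = pvALoop s pvSyn := by
  by_cases hs : s ∈ ["high", "elevated", "slightly elevated", "increased", "borderline high", "low", "decreased", "reduced", "slightly low", "borderline low", "normal", "within normal limits", "wnl", "unknown", "n/a", "not available", "none", ""]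
  · fin_cases hs <;> decide
  · simp only [List.mem_cons, List.not_mem_nil, or_false, not_or] at hs
    obtain ⟨h1, h2, h3, h4, h5, h6, h7, h8, h9, h10, h11, h12, h13, h14, h15, h16, h17, h18⟩ := hs
    have g2 : ¬ "elevated" = s := fun h => h2 h.symm
    have g4 : ¬ "increased" = s := fun h => h4 h.symm
    have g6 : ¬ "low" = s := fun h => h6 h.symm
    have g8 : ¬ "reduced" = s := fun h => h8 h.symm
    have g10 : ¬ "borderline low" = s := fun h => h10 h.symm
    have g12 : ¬ "within normal limits" = s := fun h => h12 h.symm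
    have g14 : ¬ "unknown" = s := fun h => h14 h.symm
    have g16 : ¬ "not available" = s := fun h => h16 h.symm
    have g18 : ¬ "" = s := fun h => h18 h.symm
    have hb : pvWalk 0 s.toList = none := by
      rw [pv_walk0]
      apply pv_lk_none
      rw [pv_keys_eq]
      simp only [List.mem_cons, List.not_mem_nil, or_false, not_or]
      exact ⟨fun h => h18 (String.toList_inj.mp h),
      fun h => h1 (String.toList_inj.mp h),
      fun h => h2 (String.toList_inj.mp h),
      fun h => h3 (String.toList_inj.mp h),
      fun h => h9 (String.toList_inj.mp h),
      fun h => h4 (String.toList_inj.mp h),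
      fun h => h5 (String.toList_inj.mp h),
      fun h => h10 (String.toList_inj.mp h),
      fun h => h6 (String.toList_inj.mp h),
      fun h => h7 (String.toList_inj.mp h),
      fun h => h8 (String.toList_inj.mp h),
      fun h => h11 (String.toList_inj.mp h),
      fun h => h16 (String.toList_inj.mp h),
      fun h => h17 (String.toList_inj.mp h),
      fun h => h15 (String.toList_inj.mp h),
      fun h => h12 (String.toList_inj.mp h),
      fun h => h13 (String.toList_inj.mp h),
      fun h => h14 (String.toList_inj.mp h)⟩
    rw [hb]
    simp [pvALoop, pvSyn, h1, h2, h3, h4, h5, h6, h7, h8, h9, h10, h11, h12, h13, h14, h15, h16, h17, h18]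

set_option maxHeartbeats 1000000 in
lemma pv_core' (it : String) : normalize_interpretation it = normalize_interpretation_alt it := by
  rw [normalize_interpretation, normalize_interpretation_alt,
      ← pv_core (PySem.Str.lower (PySem.Str.strip it))]

-- ===== VERDICT (by name: the statement is the Claim_ definition above) =====
theorem normalize_interpretation_spec : Claim_equal_normalize_interpretation := by
  intro it _
  unfold Spec_normalize_interpretation
  exact pv_core' it
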